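-- pv_equiv track=rewrite | github.com/ecolban/Codewars | python_code/src/count_rect_triangles.py | count_rect_triang
-- ===== SOURCE A (Python) =====
-- from collections import defaultdict
-- from math import gcd
--
-- def count_rect_triang(points):
--     points = set((x, y) for [x, y] in points)
--     d = defaultdict(lambda: defaultdict(int))
--     for p1 in points:
--         for p2 in points:
--             if p1 != p2:
--                 d[p1][direction(p1, p2)] += 1
--     return sum(d[p][(a, b)] * d[p][(-b, a)] for p in points for (a, b) in d[p] if a > 0 and (-b, a) in d[p])
--
-- def direction(p1, p2):
--     a, b = p1[0] - p2[0], p1[1] - p2[1]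
--     if a == 0: return 0, 1
--     if b == 0: return 1, 0
--     if b < 0: a, b = -a, -b
--     c = gcd(a, b)
--     return a // c, b // c
-- ===== SOURCE B (Python) =====
-- def count_rect_triang(points):
--     pts = {(x, y) for [x, y] in points}
--     total = 0
--     for p in pts:
--         for q in pts:
--             for r in pts:
--                 if q != p and r != p and (q[0] - p[0]) * (r[0] - p[0]) + (q[1] - p[1]) * (r[1] - p[1]) == 0:
--                     total += 1
--     return total // 2
-- ===== Notes on version B (the rewrite author's own statement) =====
-- stated objective: simpler
-- what changed: B replaces A's per-vertex dictionary of gcd-normalized direction counters (and the perpendicular-key pairing over it) by a direct triple loop over the deduplicated points that tests each ordered vertex/leg pair with an integer dot product and halves the total.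
import Mathlib
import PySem

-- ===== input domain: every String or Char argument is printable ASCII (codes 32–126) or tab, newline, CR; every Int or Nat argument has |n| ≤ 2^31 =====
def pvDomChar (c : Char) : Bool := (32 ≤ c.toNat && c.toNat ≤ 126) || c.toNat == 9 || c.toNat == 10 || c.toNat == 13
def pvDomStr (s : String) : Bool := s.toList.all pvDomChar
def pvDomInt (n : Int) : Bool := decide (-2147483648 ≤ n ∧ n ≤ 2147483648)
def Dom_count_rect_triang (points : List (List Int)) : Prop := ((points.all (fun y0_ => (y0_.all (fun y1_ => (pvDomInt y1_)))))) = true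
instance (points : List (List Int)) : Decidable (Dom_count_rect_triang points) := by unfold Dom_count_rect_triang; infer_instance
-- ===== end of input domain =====

-- B replaces A's per-vertex dictionary of gcd-normalized direction counters by a direct
-- triple loop over the deduplicated points that tests perpendicularity with a dot product
-- and halves the ordered count (objective: simpler; not faster).

-- ===== PORT A =====
-- shared first line of both sources: set((x, y) for [x, y] in points)
def pvToPair (row : List Int) : Int × Int :=
  match row with
  | [x, y] => (x, y)
  | _ => (0, 0)   -- unreachable under Pre_ (every row has length 2)

def pvPts (points : List (List Int)) : List (Int × Int) :=
  PySem.Set.ofList (points.map pvToPair)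

def pvDirection (p1 p2 : Int × Int) : Int × Int :=
  let a := p1.1 - p2.1
  let b := p1.2 - p2.2
  if a = 0 then (0, 1)
  else if b = 0 then (1, 0)
  else
    let a' := if b < 0 then -a else a
    let b' := if b < 0 then -b else b
    let c : Int := Int.gcd a' b'
    (PySem.Int.floordiv a' c, PySem.Int.floordiv b' c)

def count_rect_triang (points : List (List Int)) : Int :=
  let pts := pvPts points
  let d : PySem.Dict (Int × Int) (PySem.Dict (Int × Int) Int) :=
    pts.foldl (fun d p1 =>
      pts.foldl (fun d p2 =>
        if p1 ≠ p2 then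
          d.modify p1 PySem.Dict.empty (fun m => m.modify (pvDirection p1 p2) 0 (· + 1))
        else d) d)
      PySem.Dict.empty
  pts.foldl (fun acc p =>
    (d.getD p PySem.Dict.empty).keys.foldl (fun acc ab =>
      if ab.1 > 0 ∧ (d.getD p PySem.Dict.empty).contains (-ab.2, ab.1) = true then
        acc + (d.getD p PySem.Dict.empty).getD ab 0 *
              (d.getD p PySem.Dict.empty).getD (-ab.2, ab.1) 0
      else acc) acc) 0

-- ===== PORT B =====
def count_rect_triang_alt (points : List (List Int)) : Int :=
  let pts := pvPts points
  let total : Int :=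
    pts.foldl (fun t p =>
      pts.foldl (fun t q =>
        pts.foldl (fun t r =>
          if q ≠ p ∧ r ≠ p ∧ (q.1 - p.1) * (r.1 - p.1) + (q.2 - p.2) * (r.2 - p.2) = 0 then
            t + 1
          else t) t) t) 0
  PySem.Int.floordiv total 2

-- ===== PRECONDITION & SPEC =====
-- Pre_ excludes exactly the inputs on which the unpacking 'for [x, y] in points' raises
-- (a row whose length is not 2); both A and B raise there.
def Pre_count_rect_triang (points : List (List Int)) : Prop :=
  ∀ row ∈ points, row.length = 2
instance (points : List (List Int)) : Decidable (Pre_count_rect_triang points) := by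
  unfold Pre_count_rect_triang; infer_instance

def pvWitness_count_rect_triang : List (List Int) := [[0, 0], [3, 0], [0, 4]]

def Spec_count_rect_triang (points : List (List Int)) (out : Int) : Prop := out = count_rect_triang_alt points
instance (points : List (List Int)) (out : Int) : Decidable (Spec_count_rect_triang points out) := by unfold Spec_count_rect_triang; infer_instance

-- ===== CLAIM (what is proved, stated in full; the proofs are below) =====
def Claim_equal_count_rect_triang : Prop := ∀ (points : List (List Int)), Dom_count_rect_triang points → Pre_count_rect_triang points → Spec_count_rect_triang points (count_rect_triang points)

-- ===== LEMMAS AND PROOFS =====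

-- the direction function on a difference vector
def pvDvec (v : Int × Int) : Int × Int :=
  if v.1 = 0 then (0, 1)
  else if v.2 = 0 then (1, 0)
  else
    let a' := if v.2 < 0 then -v.1 else v.1
    let b' := if v.2 < 0 then -v.2 else v.2
    let c : Int := Int.gcd a' b'
    (PySem.Int.floordiv a' c, PySem.Int.floordiv b' c)

theorem pvDirection_eq_dvec (p q : Int × Int) :
    pvDirection p q = pvDvec (p.1 - q.1, p.2 - q.2) := rfl

-- the normalized perpendicular direction
def pvPerp (u : Int × Int) : Int × Int := if u.1 > 0 then (-u.2, u.1) else (u.2, -u.1)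

def pvNorm (u : Int × Int) : Prop :=
  u = (0, 1) ∨ u = (1, 0) ∨ (u.1 ≠ 0 ∧ 0 < u.2 ∧ Int.gcd u.1 u.2 = 1)

def pvCross (v w : Int × Int) : Int := v.1 * w.2 - v.2 * w.1
def pvDot (v w : Int × Int) : Int := v.1 * w.1 + v.2 * w.2

theorem pv_gcd_pos (a b : Int) (ha : a ≠ 0) : (0:Int) < Int.gcd a b := by
  have h0 : Int.gcd a b ≠ 0 := by
    intro h; exact ha (Int.gcd_eq_zero_iff.mp h).1
  exact_mod_cast Nat.pos_of_ne_zero h0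

-- core case: a ≠ 0, 0 < b
theorem pv_core (a b : Int) (ha : a ≠ 0) (hb : 0 < b) :
    (a / Int.gcd a b ≠ 0 ∧ 0 < b / Int.gcd a b ∧
     Int.gcd (a / Int.gcd a b) (b / Int.gcd a b) = 1) ∧
    a = Int.gcd a b * (a / Int.gcd a b) ∧ b = Int.gcd a b * (b / Int.gcd a b) := by
  have hg : (0:Int) < Int.gcd a b := pv_gcd_pos a b ha
  have hda : (Int.gcd a b : Int) ∣ a := Int.gcd_dvd_left a b
  have hdb : (Int.gcd a b : Int) ∣ b := Int.gcd_dvd_right a b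
  have hea : Int.gcd a b * (a / Int.gcd a b) = a := Int.mul_ediv_cancel' hda
  have heb : Int.gcd a b * (b / Int.gcd a b) = b := Int.mul_ediv_cancel' hdb
  refine ⟨⟨?_, Int.ediv_pos_of_pos_of_dvd hb (by omega) hdb, Int.gcd_div_gcd_div_gcd (by exact_mod_cast hg)⟩, hea.symm, heb.symm⟩
  intro h0
  rw [h0, mul_zero] at hea
  exact ha hea.symm

theorem pv_dvec_eq (v : Int × Int) (h1 : v.1 ≠ 0) (h2 : v.2 ≠ 0) (hneg : v.2 < 0) :
    pvDvec v = (PySem.Int.floordiv (-v.1) (Int.gcd (-v.1) (-v.2)), PySem.Int.floordiv (-v.2) (Int.gcd (-v.1) (-v.2))) := by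
  simp [pvDvec, h1, h2, hneg]

theorem pv_floordiv_gcd (a b : Int) (ha : a ≠ 0) (hb : 0 < b) :
    PySem.Int.floordiv a (Int.gcd a b) = a / Int.gcd a b ∧
    PySem.Int.floordiv b (Int.gcd a b) = b / Int.gcd a b := by
  have hg : (0:Int) < Int.gcd a b := pv_gcd_pos a b ha
  exact ⟨PySem.Int.floordiv_eq_ediv_of_pos hg, PySem.Int.floordiv_eq_ediv_of_pos hg⟩

theorem pvDvec_norm (v : Int × Int) (h : v ≠ (0, 0)) : pvNorm (pvDvec v) := by
  obtain ⟨a, b⟩ := v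
  by_cases ha : a = 0
  · left; simp [pvDvec, ha]
  · by_cases hb : b = 0
    · right; left; simp [pvDvec, ha, hb]
    · right; right
      rcases lt_or_gt_of_ne hb with hneg | hpos
      · have e := pv_dvec_eq (a, b) ha hb hneg
        have hc := pv_core (-a) (-b) (by omega) (by omega)
        have hf := pv_floordiv_gcd (-a) (-b) (by omega) (by omega)
        rw [e, hf.1, hf.2]
        exact ⟨hc.1.1, hc.1.2.1, hc.1.2.2⟩
      · have e : pvDvec (a, b) = (PySem.Int.floordiv a (Int.gcd a b), PySem.Int.floordiv b (Int.gcd a b)) := by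
          have hnb : ¬ b < 0 := by omega
          simp [pvDvec, ha, hb, hnb]
        have hc := pv_core a b ha hpos
        have hf := pv_floordiv_gcd a b ha hpos
        rw [e, hf.1, hf.2]
        exact ⟨hc.1.1, hc.1.2.1, hc.1.2.2⟩

theorem pvDvec_scale (v : Int × Int) (h : v ≠ (0, 0)) :
    ∃ t : Int, t ≠ 0 ∧ v = (t * (pvDvec v).1, t * (pvDvec v).2) := by
  obtain ⟨a, b⟩ := v
  by_cases ha : a = 0
  · have hb : b ≠ 0 := by rintro rfl; exact h (by simp [ha])
    exact ⟨b, hb, by simp [pvDvec, ha]⟩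
  · by_cases hb : b = 0
    · exact ⟨a, ha, by simp [pvDvec, ha, hb]⟩
    · rcases lt_or_gt_of_ne hb with hneg | hpos
      · have e := pv_dvec_eq (a, b) ha hb hneg
        have hc := pv_core (-a) (-b) (by omega) (by omega)
        have hf := pv_floordiv_gcd (-a) (-b) (by omega) (by omega)
        have hgp : (0:Int) < Int.gcd (-a) (-b) := pv_gcd_pos _ _ (by omega)
        refine ⟨-(Int.gcd (-a) (-b)), by omega, ?_⟩
        rw [e, hf.1, hf.2]
        have h1 := hc.2.1; have h2 := hc.2.2
        simp only [Prod.mk.injEq]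
        constructor <;> nlinarith [h1, h2]
      · have e : pvDvec (a, b) = (PySem.Int.floordiv a (Int.gcd a b), PySem.Int.floordiv b (Int.gcd a b)) := by
          have hnb : ¬ b < 0 := by omega
          simp [pvDvec, ha, hb, hnb]
        have hc := pv_core a b ha hpos
        have hf := pv_floordiv_gcd a b ha hpos
        refine ⟨Int.gcd a b, by have := pv_gcd_pos a b ha; omega, ?_⟩
        rw [e, hf.1, hf.2]
        simp only [Prod.mk.injEq]
        exact ⟨hc.2.1, hc.2.2⟩

theorem pvNorm_unique (u u' : Int × Int) (hu : pvNorm u) (hu' : pvNorm u')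
    (h : pvCross u u' = 0) : u = u' := by
  obtain ⟨a, b⟩ := u; obtain ⟨c, d⟩ := u'
  simp only [pvCross] at h
  rcases hu with h1 | h1 | ⟨ha, hb, hg⟩ <;> rcases hu' with h2 | h2 | ⟨hc, hd, hg'⟩
  · rw [h1, h2]
  · exfalso; injection h1 with e1 e2; injection h2 with e3 e4
    subst e1; subst e2; subst e3; subst e4; norm_num at h
  · exfalso; injection h1 with e1 e2; subst e1; subst e2
    simp only at hc hd hg'; simp at h; omega
  · exfalso; injection h1 with e1 e2; injection h2 with e3 e4
    subst e1; subst e2; subst e3; subst e4; norm_num at h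
  · rw [h1, h2]
  · exfalso; injection h1 with e1 e2; subst e1; subst e2
    simp only at hc hd hg'; simp at h; omega
  · exfalso; injection h2 with e3 e4; subst e3; subst e4
    simp only at ha hb hg; simp at h; omega
  · exfalso; injection h2 with e3 e4; subst e3; subst e4
    simp only at ha hb hg; simp at h; omega
  · -- general vs general
    simp only at ha hb hg hc hd hg' h
    have hco : IsCoprime b a := by
      rw [Int.isCoprime_iff_gcd_eq_one, Int.gcd_comm]; exact hg
    have hco' : IsCoprime d c := by
      rw [Int.isCoprime_iff_gcd_eq_one, Int.gcd_comm]; exact hg'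
    have hbd : b ∣ d := by
      have : b ∣ a * d := ⟨c, by linarith⟩
      exact hco.dvd_of_dvd_mul_left this
    have hdb : d ∣ b := by
      have : d ∣ c * b := ⟨a, by linarith⟩
      exact hco'.dvd_of_dvd_mul_left this
    have hbde : b = d := Int.dvd_antisymm (by omega) (by omega) hbd hdb
    have hac : a = c := by
      subst hbde
      have hbne : b ≠ 0 := by omega
      have : a * b = c * b := by ring_nf; ring_nf at h; linarith
      exact mul_right_cancel₀ hbne this
    simp [hac, hbde]

theorem pvDvec_cross_zero (v w : Int × Int) (hv : v ≠ (0, 0)) (hw : w ≠ (0, 0))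
    (h : pvCross v w = 0) : pvDvec v = pvDvec w := by
  obtain ⟨t, ht, hveq⟩ := pvDvec_scale v hv
  obtain ⟨s, hs, hweq⟩ := pvDvec_scale w hw
  apply pvNorm_unique _ _ (pvDvec_norm v hv) (pvDvec_norm w hw)
  have hexp : pvCross v w = t * s * pvCross (pvDvec v) (pvDvec w) := by
    conv_lhs => rw [hveq, hweq]
    simp [pvCross]; ring
  rw [hexp] at h
  rcases mul_eq_zero.mp h with h' | h'
  · exact absurd (mul_eq_zero.mp h') (by push_neg; exact ⟨ht, hs⟩)
  · exact h'

theorem pvNorm_perp (u : Int × Int) (hu : pvNorm u) : pvNorm (pvPerp u) := by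
  obtain ⟨a, b⟩ := u
  rcases hu with h | h | ⟨ha, hb, hg⟩
  · simp at h; right; left; simp [pvPerp, h]
  · simp at h; left; simp [pvPerp, h]
  · simp only at ha hb hg
    by_cases hpos : a > 0
    · right; right
      have e : pvPerp (a, b) = (-b, a) := by simp [pvPerp, hpos]
      rw [e]
      refine ⟨by simp; omega, by simp; omega, ?_⟩
      simp only
      rw [Int.neg_gcd, Int.gcd_comm]; exact hg
    · right; right
      have e : pvPerp (a, b) = (b, -a) := by simp [pvPerp, hpos]
      rw [e]
      refine ⟨by simp; omega, by simp; omega, ?_⟩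
      simp only
      rw [Int.gcd_neg, Int.gcd_comm]; exact hg

theorem pvPerp_perp (u : Int × Int) (hu : pvNorm u) : pvPerp (pvPerp u) = u := by
  obtain ⟨a, b⟩ := u
  rcases hu with h | h | ⟨ha, hb, hg⟩
  · simp at h; simp [pvPerp, h]
  · simp at h; simp [pvPerp, h]
  · simp only at ha hb hg
    by_cases hpos : a > 0
    · have h1 : ¬ (-b > 0) := by omega
      simp [pvPerp, hpos, h1]
      all_goals omega
    · have h1 : b > 0 := hb
      simp [pvPerp, hpos, h1]
      all_goals omega

theorem pvPerp_pos (u : Int × Int) (hu : pvNorm u) : (pvPerp u).1 > 0 ↔ ¬ u.1 > 0 := by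
  obtain ⟨a, b⟩ := u
  rcases hu with h | h | ⟨ha, hb, hg⟩
  · simp at h; simp [pvPerp, h]
  · simp at h; simp [pvPerp, h]
  · simp only at ha hb hg
    by_cases hpos : a > 0 <;> simp [pvPerp, hpos] <;> omega

theorem pvDot_perp_self (u : Int × Int) : pvDot u (pvPerp u) = 0 := by
  obtain ⟨a, b⟩ := u
  by_cases hpos : a > 0 <;> simp [pvDot, pvPerp, hpos] <;> ring

theorem pvDvec_perp (v : Int × Int) (h : v ≠ (0, 0)) :
    pvDvec (-v.2, v.1) = pvPerp (pvDvec v) := by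
  have hperp : ((-v.2, v.1) : Int × Int) ≠ (0, 0) := by
    obtain ⟨a, b⟩ := v; simp_all; omega
  obtain ⟨t, ht, hveq⟩ := pvDvec_scale v h
  obtain ⟨s, hs, hweq⟩ := pvDvec_scale (-v.2, v.1) hperp
  apply pvNorm_unique _ _ (pvDvec_norm _ hperp) (pvNorm_perp _ (pvDvec_norm v h))
  -- cross (dvec (perp v)) (pvPerp (dvec v)) = 0
  have key : pvCross (-v.2, v.1) (pvPerp (pvDvec v)) = 0 := by
    have hx : ((-v.2, v.1) : Int × Int) = (-(t * (pvDvec v).2), t * (pvDvec v).1) := by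
      conv_lhs => rw [hveq]
    rw [hx]
    have : pvCross (-(t * (pvDvec v).2), t * (pvDvec v).1) (pvPerp (pvDvec v)) =
        t * pvCross (-(pvDvec v).2, (pvDvec v).1) (pvPerp (pvDvec v)) := by
      simp [pvCross]; ring
    rw [this]
    have hz : pvCross (-(pvDvec v).2, (pvDvec v).1) (pvPerp (pvDvec v)) = 0 := by
      obtain ⟨a, b⟩ := pvDvec v
      by_cases hpos : a > 0 <;> simp [pvCross, pvPerp, hpos] <;> ring
    rw [hz, mul_zero]
  -- lift through the scale of (-v.2, v.1)
  have : pvCross (-v.2, v.1) (pvPerp (pvDvec v)) =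
      s * pvCross (pvDvec (-v.2, v.1)) (pvPerp (pvDvec v)) := by
    conv_lhs => rw [hweq]
    simp [pvCross]; ring
  rw [this] at key
  rcases mul_eq_zero.mp key with h' | h'
  · exact absurd h' hs
  · exact h'

theorem pvPerp_dot (v w : Int × Int) (hv : v ≠ (0, 0)) (hw : w ≠ (0, 0)) :
    pvDot v w = 0 ↔ pvDvec w = pvPerp (pvDvec v) := by
  constructor
  · intro h
    have hperp : ((-v.2, v.1) : Int × Int) ≠ (0, 0) := by
      obtain ⟨a, b⟩ := v; simp_all; omega
    have hc : pvCross (-v.2, v.1) w = 0 := by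
      simp only [pvCross, pvDot] at *; ring_nf; ring_nf at h; linarith
    rw [← pvDvec_perp v hv]
    exact (pvDvec_cross_zero _ _ hperp hw hc).symm
  · intro h
    obtain ⟨t, ht, hveq⟩ := pvDvec_scale v hv
    obtain ⟨s, hs, hweq⟩ := pvDvec_scale w hw
    have : pvDot v w = t * s * pvDot (pvDvec v) (pvDvec w) := by
      conv_lhs => rw [hveq, hweq]
      simp [pvDot]; ring
    rw [this, h, pvDot_perp_self, mul_zero]


theorem pv_vec_ne (p q : Int × Int) (h : p ≠ q) :
    ((p.1 - q.1, p.2 - q.2) : Int × Int) ≠ (0, 0) := by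
  intro heq
  apply h
  rw [Prod.ext_iff] at heq ⊢
  simp at heq ⊢
  omega

theorem pvDirection_norm (p q : Int × Int) (h : p ≠ q) : pvNorm (pvDirection p q) := by
  rw [pvDirection_eq_dvec]
  exact pvDvec_norm _ (pv_vec_ne p q h)

theorem pvPerp_key (p q r : Int × Int) (hq : p ≠ q) (hr : p ≠ r) :
    (q.1 - p.1) * (r.1 - p.1) + (q.2 - p.2) * (r.2 - p.2) = 0 ↔
      pvDirection p r = pvPerp (pvDirection p q) := by
  have hv := pv_vec_ne p q hq
  have hw := pv_vec_ne p r hr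
  have hd : (q.1 - p.1) * (r.1 - p.1) + (q.2 - p.2) * (r.2 - p.2) =
      pvDot (p.1 - q.1, p.2 - q.2) (p.1 - r.1, p.2 - r.2) := by
    simp [pvDot]; ring
  rw [hd, pvDirection_eq_dvec, pvDirection_eq_dvec]
  exact pvPerp_dot _ _ hv hw

-- ---- generic list-sum lemmas ----

theorem pv_sum_map_add {α : Type} (l : List α) (f g : α → Int) :
    (l.map (fun x => f x + g x)).sum = (l.map f).sum + (l.map g).sum := by
  induction l with
  | nil => simp
  | cons a t ih => simp [ih]; ring

theorem pv_sum_map_congr {α : Type} {l : List α} {f g : α → Int}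
    (h : ∀ x ∈ l, f x = g x) : (l.map f).sum = (l.map g).sum := by
  rw [List.map_congr_left h]

theorem pv_sum_map_comm {α β : Type} (l1 : List α) (l2 : List β) (f : α → β → Int) :
    (l1.map (fun y => (l2.map (f y)).sum)).sum =
      (l2.map (fun z => (l1.map (fun y => f y z)).sum)).sum := by
  induction l1 with
  | nil => simp
  | cons a t ih =>
    simp only [List.map_cons, List.sum_cons, ih, ← pv_sum_map_add]

theorem pv_count_as_sum (l : List (Int × Int)) (v : Int × Int) :
    (l.map (fun z => if z = v then (1 : Int) else 0)).sum = (l.count v : Int) := by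
  induction l with
  | nil => simp
  | cons a t ih =>
    by_cases h : a = v <;> simp [List.count_cons, h, ih] <;> omega

theorem pv_sum_map_two_mul {α : Type} (l : List α) (f : α → Int) :
    (l.map (fun x => 2 * f x)).sum = 2 * (l.map f).sum := by
  induction l with
  | nil => simp
  | cons a t ih => simp [ih]; ring

theorem pv_sum_count_mul (ys : List (Int × Int)) (f : (Int × Int) → Int) :
    ((PySem.Set.ofList ys).map (fun k => (ys.count k : Int) * f k)).sum = (ys.map f).sum := by
  have hnd : (PySem.Set.ofList ys).Nodup := PySem.Set.nodup_ofList ys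
  have hfs : (PySem.Set.ofList ys).toFinset = ys.toFinset := by
    apply Finset.ext
    intro x
    simp [List.mem_toFinset, PySem.Set.mem_ofList]
  rw [← List.sum_toFinset _ hnd, hfs, Finset.sum_list_map_count]
  apply Finset.sum_congr rfl
  intro x _
  rw [nsmul_eq_mul]
  congr 2
  apply List.countP_congr
  intro a _
  simp

-- ---- the dictionary built by A ----

theorem pv_inner_getD (p1 : Int × Int) (xs : List (Int × Int))
    (d : PySem.Dict (Int × Int) (PySem.Dict (Int × Int) Int)) (x : Int × Int) :
    ((xs.foldl (fun d p2 => if p1 ≠ p2 then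
        d.modify p1 PySem.Dict.empty (fun m => m.modify (pvDirection p1 p2) 0 (· + 1))
      else d) d).getD x PySem.Dict.empty)
    = if x = p1 then
        ((xs.filter (fun p2 => decide (p1 ≠ p2))).map (pvDirection p1)).foldl
          (fun m y => m.modify y 0 (· + 1)) (d.getD p1 PySem.Dict.empty)
      else d.getD x PySem.Dict.empty := by
  induction xs generalizing d with
  | nil =>
    simp only [List.foldl_nil, List.filter_nil, List.map_nil]
    by_cases hx : x = p1
    · rw [if_pos hx, hx]
    · rw [if_neg hx]
  | cons a t ih =>
    by_cases ha : p1 = a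
    · obtain rfl := ha
      rw [List.foldl_cons, if_neg (show ¬(p1 ≠ p1) by simp),
          List.filter_cons, if_neg (show ¬(decide (p1 ≠ p1) = true) by simp), ih]
    · rw [List.foldl_cons, if_pos (show p1 ≠ a from ha),
          List.filter_cons, if_pos (show decide (p1 ≠ a) = true by simpa using ha), ih]
      by_cases hx : x = p1 <;> simp [PySem.Dict.getD_modify, hx]

def pvYs (L : List (Int × Int)) (p : Int × Int) : List (Int × Int) :=
  (L.filter (fun q => decide (p ≠ q))).map (pvDirection p)

theorem pv_outer_getD_not_mem (L : List (Int × Int)) (xs : List (Int × Int))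
    (d : PySem.Dict (Int × Int) (PySem.Dict (Int × Int) Int)) (p : Int × Int)
    (hp : p ∉ xs) :
    ((xs.foldl (fun d p1 => L.foldl (fun d p2 => if p1 ≠ p2 then
        d.modify p1 PySem.Dict.empty (fun m => m.modify (pvDirection p1 p2) 0 (· + 1))
      else d) d) d).getD p PySem.Dict.empty) = d.getD p PySem.Dict.empty := by
  induction xs generalizing d with
  | nil => rfl
  | cons a t ih =>
    have hpa : p ≠ a := fun h => hp (by simp [h])
    rw [List.foldl_cons, ih _ (fun h => hp (by simp [h])), pv_inner_getD, if_neg hpa]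

theorem pv_outer_getD (L : List (Int × Int)) (xs : List (Int × Int))
    (d : PySem.Dict (Int × Int) (PySem.Dict (Int × Int) Int)) (p : Int × Int)
    (hnd : xs.Nodup) (hp : p ∈ xs) (hinit : d.getD p PySem.Dict.empty = PySem.Dict.empty) :
    ((xs.foldl (fun d p1 => L.foldl (fun d p2 => if p1 ≠ p2 then
        d.modify p1 PySem.Dict.empty (fun m => m.modify (pvDirection p1 p2) 0 (· + 1))
      else d) d) d).getD p PySem.Dict.empty) = PySem.Dict.counter (pvYs L p) := by
  induction xs generalizing d with
  | nil => cases hp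
  | cons a t ih =>
    rw [List.foldl_cons]
    by_cases hpa : p = a
    · obtain rfl := hpa
      have hnt : p ∉ t := (List.nodup_cons.mp hnd).1
      rw [pv_outer_getD_not_mem L t _ p hnt, pv_inner_getD, if_pos rfl, hinit]
      rw [PySem.Dict.counter_eq_foldl, pvYs]
    · have hpt : p ∈ t := by
        rcases List.mem_cons.mp hp with h | h
        · exact absurd h hpa
        · exact h
      apply ih
      · exact (List.nodup_cons.mp hnd).2
      · exact hpt
      · rw [pv_inner_getD, if_neg hpa, hinit]

-- ---- per-vertex sums ----

def pvCnt (L : List (Int × Int)) (p v : Int × Int) : Int := ((pvYs L p).count v : Int)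

def pvSA (L : List (Int × Int)) (p : Int × Int) : Int :=
  ((PySem.Set.ofList (pvYs L p)).map (fun k =>
    if k.1 > 0 ∧ (-k.2, k.1) ∈ pvYs L p then pvCnt L p k * pvCnt L p (-k.2, k.1) else 0)).sum

def pvSB (L : List (Int × Int)) (p : Int × Int) : Int :=
  (L.map (fun q => (L.countP (fun r =>
    decide (q ≠ p ∧ r ≠ p ∧ (q.1 - p.1) * (r.1 - p.1) + (q.2 - p.2) * (r.2 - p.2) = 0)) : Int))).sum

theorem pvYs_norm (L : List (Int × Int)) (p : Int × Int) :
    ∀ y ∈ pvYs L p, pvNorm y := by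
  intro y hy
  simp only [pvYs, List.mem_map, List.mem_filter] at hy
  obtain ⟨q, ⟨_, hq⟩, rfl⟩ := hy
  exact pvDirection_norm p q (by simpa using hq)

theorem pv_ys_count (L : List (Int × Int)) (p v : Int × Int) :
    (pvYs L p).count v = L.countP (fun r => decide (p ≠ r ∧ pvDirection p r = v)) := by
  rw [pvYs, List.count_eq_countP, List.countP_map, List.countP_filter]
  apply List.countP_congr
  intro r _
  by_cases h1 : p ≠ r <;> by_cases h2 : pvDirection p r = v <;>
    simp [Function.comp, h1, h2]

theorem pv_sum_ite_filter' {α : Type} (l : List α) (P : α → Prop) [DecidablePred P]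
    (g : α → Int) :
    (l.map (fun x => if P x then g x else 0)).sum =
      ((l.filter (fun x => decide (P x))).map g).sum := by
  induction l with
  | nil => simp
  | cons a t ih =>
    by_cases h : P a <;> simp [List.filter_cons, h, ih]

theorem pv_iff_swap (y z : Int × Int) (hy : pvNorm y) (hz : pvNorm z) :
    (¬ y.1 > 0 ∧ z = pvPerp y) ↔ (z.1 > 0 ∧ y = pvPerp z) := by
  constructor
  · rintro ⟨h1, rfl⟩
    exact ⟨(pvPerp_pos y hy).mpr h1, (pvPerp_perp y hy).symm⟩
  · rintro ⟨h1, rfl⟩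
    refine ⟨?_, (pvPerp_perp z hz).symm⟩
    intro hcon
    exact ((pvPerp_pos z hz).mp hcon) h1

theorem pv_pairing (ys : List (Int × Int)) (hn : ∀ y ∈ ys, pvNorm y) :
    (ys.map (fun y => (ys.count (pvPerp y) : Int))).sum =
      2 * (ys.map (fun y => if y.1 > 0 then (ys.count (pvPerp y) : Int) else 0)).sum := by
  have hsplit : (ys.map (fun y => (ys.count (pvPerp y) : Int))).sum =
      (ys.map (fun y => if y.1 > 0 then (ys.count (pvPerp y) : Int) else 0)).sum +
      (ys.map (fun y => if ¬ y.1 > 0 then (ys.count (pvPerp y) : Int) else 0)).sum := by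
    rw [← pv_sum_map_add]
    apply pv_sum_map_congr
    intro y _
    by_cases h : y.1 > 0 <;> simp [h]
  have hswap : (ys.map (fun y => if ¬ y.1 > 0 then (ys.count (pvPerp y) : Int) else 0)).sum =
      (ys.map (fun y => if y.1 > 0 then (ys.count (pvPerp y) : Int) else 0)).sum := by
    have e1 : (ys.map (fun y => if ¬ y.1 > 0 then (ys.count (pvPerp y) : Int) else 0)).sum =
        (ys.map (fun y => (ys.map (fun z =>
          if ¬ y.1 > 0 ∧ z = pvPerp y then (1 : Int) else 0)).sum)).sum := by
      apply pv_sum_map_congr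
      intro y _
      by_cases h : y.1 > 0
      · simp [h]
      · rw [if_pos h, ← pv_count_as_sum ys (pvPerp y)]
        apply pv_sum_map_congr
        intro z _
        by_cases hz : z = pvPerp y <;> simp [h, hz]
    have e2 : (ys.map (fun z => if z.1 > 0 then (ys.count (pvPerp z) : Int) else 0)).sum =
        (ys.map (fun z => (ys.map (fun y =>
          if z.1 > 0 ∧ y = pvPerp z then (1 : Int) else 0)).sum)).sum := by
      apply pv_sum_map_congr
      intro z _
      by_cases h : z.1 > 0
      · rw [if_pos h, ← pv_count_as_sum ys (pvPerp z)]
        apply pv_sum_map_congr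
        intro y _
        by_cases hy : y = pvPerp z <;> simp [h, hy]
      · simp [h]
    rw [e1, e2, pv_sum_map_comm]
    apply pv_sum_map_congr
    intro z hzmem
    apply pv_sum_map_congr
    intro y hymem
    have hiff := pv_iff_swap y z (hn y hymem) (hn z hzmem)
    by_cases h : ¬ y.1 > 0 ∧ z = pvPerp y
    · rw [if_pos h, if_pos (hiff.mp h)]
    · rw [if_neg h, if_neg (fun hc => h (hiff.mpr hc))]
  omega

theorem pv_perp_pair (L : List (Int × Int)) (p : Int × Int) :
    pvSB L p = 2 * pvSA L p := by
  have hnorm := pvYs_norm L p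
  -- A-side: pvSA = Σ_{y ∈ ys} ite (y.1 > 0) (count (pvPerp y)) 0
  have hA : pvSA L p = ((pvYs L p).map (fun y =>
      if y.1 > 0 then ((pvYs L p).count (pvPerp y) : Int) else 0)).sum := by
    have e : ((PySem.Set.ofList (pvYs L p)).map (fun k =>
        if k.1 > 0 ∧ (-k.2, k.1) ∈ pvYs L p then pvCnt L p k * pvCnt L p (-k.2, k.1) else 0)) =
        ((PySem.Set.ofList (pvYs L p)).map (fun k => ((pvYs L p).count k : Int) *
          (if k.1 > 0 then ((pvYs L p).count (pvPerp k) : Int) else 0))) := by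
      apply List.map_congr_left
      intro k hk
      by_cases hpos : k.1 > 0
      · have hperp : pvPerp k = (-k.2, k.1) := by rw [pvPerp, if_pos hpos]
        by_cases hmem : (-k.2, k.1) ∈ pvYs L p
        · rw [if_pos ⟨hpos, hmem⟩, if_pos hpos, pvCnt, pvCnt, hperp]
        · rw [if_neg (fun hc => hmem hc.2), if_pos hpos, hperp,
            List.count_eq_zero_of_not_mem hmem]
          simp
      · rw [if_neg (fun hc => hpos hc.1), if_neg hpos, mul_zero]
    rw [pvSA, e, pv_sum_count_mul]
  -- B-side: pvSB = Σ_{y ∈ ys} count (pvPerp y)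
  have hB : pvSB L p = ((pvYs L p).map (fun y => ((pvYs L p).count (pvPerp y) : Int))).sum := by
    have e : (L.map (fun q => (L.countP (fun r =>
        decide (q ≠ p ∧ r ≠ p ∧ (q.1 - p.1) * (r.1 - p.1) + (q.2 - p.2) * (r.2 - p.2) = 0)) : Int))) =
        (L.map (fun q => if p ≠ q then ((pvYs L p).count (pvPerp (pvDirection p q)) : Int) else 0)) := by
      apply List.map_congr_left
      intro q _
      by_cases hq : p ≠ q
      · rw [if_pos hq, pv_ys_count]
        congr 1
        apply List.countP_congr
        intro r _
        by_cases hr : p ≠ r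
        · have hiff := pvPerp_key p q r hq hr
          by_cases hd : (q.1 - p.1) * (r.1 - p.1) + (q.2 - p.2) * (r.2 - p.2) = 0
          · simp [hq.symm, hr.symm, hr, hd, hiff.mp hd]
          · have hnd : ¬ pvDirection p r = pvPerp (pvDirection p q) := fun hc => hd (hiff.mpr hc)
            simp [hd, hnd]
        · have hr' : r = p := by push_neg at hr; exact hr.symm
          simp [hr']
      · push_neg at hq
        rw [if_neg (by simp [hq])]
        simp only [Nat.cast_eq_zero, List.countP_eq_zero]
        intro r _
        simp [hq]
    rw [pvSB, e, pv_sum_ite_filter' L (fun q => p ≠ q), pvYs, List.map_map]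
    rfl
  rw [hA, hB]
  exact pv_pairing _ hnorm

-- ---- assembling the two ports ----

theorem pv_foldl_congr {α β : Type} {l : List α} {f g : β → α → β} (a : β)
    (h : ∀ acc x, x ∈ l → f acc x = g acc x) : l.foldl f a = l.foldl g a := by
  induction l generalizing a with
  | nil => rfl
  | cons c t ih =>
    rw [List.foldl_cons, List.foldl_cons, h a c (by simp)]
    exact ih _ (fun acc x hx => h acc x (by simp [hx]))

theorem pv_foldl_add {α : Type} (l : List α) (g : α → Int) (a : Int) :
    l.foldl (fun acc x => acc + g x) a = a + (l.map g).sum := by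
  induction l generalizing a with
  | nil => simp
  | cons c t ih => simp [ih]; ring

theorem pv_foldl_ite_add_one {α : Type} (l : List α) (P : α → Prop) [DecidablePred P] (a : Int) :
    l.foldl (fun acc x => if P x then acc + 1 else acc) a =
      a + (l.countP (fun x => decide (P x)) : Int) := by
  induction l generalizing a with
  | nil => simp
  | cons c t ih =>
    rw [List.foldl_cons, List.countP_cons]
    by_cases h : P c <;> simp [h, ih] <;> push_cast <;> ring

theorem pvA_eq (points : List (List Int)) :
    count_rect_triang points = ((pvPts points).map (fun p => pvSA (pvPts points) p)).sum := by
  simp only [count_rect_triang]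
  have hD : ∀ p ∈ pvPts points,
      (((pvPts points).foldl (fun d p1 => (pvPts points).foldl (fun d p2 => if p1 ≠ p2 then
          d.modify p1 PySem.Dict.empty (fun m => m.modify (pvDirection p1 p2) 0 (· + 1))
        else d) d) PySem.Dict.empty).getD p PySem.Dict.empty) =
        PySem.Dict.counter (pvYs (pvPts points) p) := by
    intro p hp
    apply pv_outer_getD
    · exact PySem.Set.nodup_ofList _
    · exact hp
    · rfl
  rw [pv_foldl_congr (g := fun acc p => acc + pvSA (pvPts points) p) 0 ?_, pv_foldl_add, zero_add]
  intro acc p hp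
  beta_reduce
  rw [hD p hp, PySem.Dict.keys_counter]
  rw [pv_foldl_congr (g := fun acc ab => acc +
    (if ab.1 > 0 ∧ (-ab.2, ab.1) ∈ pvYs (pvPts points) p
      then pvCnt (pvPts points) p ab * pvCnt (pvPts points) p (-ab.2, ab.1) else 0)) acc ?_,
    pv_foldl_add]
  · rfl
  intro acc2 k hk
  beta_reduce
  have hcont : (PySem.Dict.counter (pvYs (pvPts points) p)).contains (-k.2, k.1) = true ↔
      (-k.2, k.1) ∈ pvYs (pvPts points) p := by
    rw [PySem.Dict.contains_eq_decide_mem_keys, PySem.Dict.keys_counter]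
    simp [PySem.Set.mem_ofList]
  by_cases hc : k.1 > 0 ∧ (-k.2, k.1) ∈ pvYs (pvPts points) p
  · rw [if_pos ⟨hc.1, hcont.mpr hc.2⟩, if_pos hc,
      PySem.Dict.getD_counter, PySem.Dict.getD_counter, pvCnt, pvCnt]
  · rw [if_neg (fun hx => hc ⟨hx.1, hcont.mp hx.2⟩), if_neg hc, add_zero]

theorem pvB_eq (points : List (List Int)) :
    count_rect_triang_alt points =
      PySem.Int.floordiv (((pvPts points).map (fun p => pvSB (pvPts points) p)).sum) 2 := by
  simp only [count_rect_triang_alt]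
  congr 1
  rw [pv_foldl_congr (g := fun t p => t + pvSB (pvPts points) p) 0 ?_, pv_foldl_add, zero_add]
  intro t p _
  beta_reduce
  rw [pv_foldl_congr (g := fun t q => t + ((pvPts points).countP (fun r =>
      decide (q ≠ p ∧ r ≠ p ∧ (q.1 - p.1) * (r.1 - p.1) + (q.2 - p.2) * (r.2 - p.2) = 0)) : Int)) t ?_,
    pv_foldl_add]
  · rfl
  intro t2 q _
  beta_reduce
  exact pv_foldl_ite_add_one _ _ _

-- ===== VERDICT (by name: the statement is the Claim_ definition above) =====
theorem count_rect_triang_spec : Claim_equal_count_rect_triang := by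
  intro points _ _
  unfold Spec_count_rect_triang
  rw [pvA_eq, pvB_eq]
  have h : ((pvPts points).map (fun p => pvSB (pvPts points) p)).sum =
      2 * ((pvPts points).map (fun p => pvSA (pvPts points) p)).sum := by
    rw [show ((pvPts points).map (fun p => pvSB (pvPts points) p)) =
        ((pvPts points).map (fun p => 2 * pvSA (pvPts points) p)) from
      List.map_congr_left (fun p _ => pv_perp_pair _ p)]
    exact pv_sum_map_two_mul _ _
  rw [h, PySem.Int.floordiv_eq_ediv_of_pos (by norm_num), Int.mul_ediv_cancel_left _ (by norm_num)]
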